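-- pv_equiv track=rewrite | github.com/srolandmarshall/BaseClaw | scripts/player_universe.py | _source_priority
-- ===== SOURCE A (Python) =====
-- def _source_priority(tags):
--     order = {
--         "taken_players": 0,
--         "waivers": 1,
--         "free_agents_p": 2,
--         "free_agents_b": 3,
--     }
--     if not tags:
--         return 999
--     return min(order.get(tag, 999) for tag in tags)
-- ===== SOURCE B (Python) =====
-- def _source_priority(tags):
--     if "taken_players" in tags:
--         return 0
--     if "waivers" in tags:
--         return 1
--     if "free_agents_p" in tags:
--         return 2
--     if "free_agents_b" in tags:
--         return 3
--     return 999
-- ===== Notes on version B (the rewrite author's own statement) =====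
-- stated objective: alternative
-- what changed: Replaces the scan of all tags taking a minimum of dict lookups by probing the four known sources in ascending-priority order and returning the first membership hit (no dict, no min, no empty-list guard).
import Mathlib
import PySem

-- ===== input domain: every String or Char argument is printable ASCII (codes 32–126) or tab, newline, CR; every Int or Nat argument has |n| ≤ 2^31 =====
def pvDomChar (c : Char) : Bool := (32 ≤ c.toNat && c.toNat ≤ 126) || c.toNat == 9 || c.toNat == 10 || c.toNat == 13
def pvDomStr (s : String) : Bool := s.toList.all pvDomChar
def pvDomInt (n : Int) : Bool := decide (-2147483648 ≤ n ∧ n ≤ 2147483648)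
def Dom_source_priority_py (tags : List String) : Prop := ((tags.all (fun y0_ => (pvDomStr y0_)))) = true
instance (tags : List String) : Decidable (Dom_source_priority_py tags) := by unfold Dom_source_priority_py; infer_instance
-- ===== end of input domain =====

-- B probes the four known sources in ascending-priority order (first membership hit) instead of scanning all tags for a minimum of dict lookups; alternative decomposition, same cost.


-- ===== PORT A =====
-- the literal dict 'order'
def pvOrder : PySem.Dict String Int :=
  PySem.Dict.ofList [("taken_players", 0), ("waivers", 1), ("free_agents_p", 2), ("free_agents_b", 3)]

def source_priority_py (tags : List String) : Int :=
  if tags = [] then 999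
  else
    -- min(order.get(tag, 999) for tag in tags); min? is none only on [], excluded by the guard
    match PySem.List.min? (tags.map (fun tag => pvOrder.getD tag 999)) (fun y => y) with
    | some m => m
    | none => 999

-- ===== PORT B =====
def source_priority_py_alt (tags : List String) : Int :=
  if tags.contains "taken_players" then 0
  else if tags.contains "waivers" then 1
  else if tags.contains "free_agents_p" then 2
  else if tags.contains "free_agents_b" then 3
  else 999

-- ===== PRECONDITION & SPEC =====
def Spec_source_priority_py (tags : List String) (out : Int) : Prop := out = source_priority_py_alt tags
instance (tags : List String) (out : Int) : Decidable (Spec_source_priority_py tags out) := by unfold Spec_source_priority_py; infer_instance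

-- ===== CLAIM (what is proved, stated in full; the proofs are below) =====
def Claim_equal_source_priority_py : Prop := ∀ (tags : List String), Dom_source_priority_py tags → Spec_source_priority_py tags (source_priority_py tags)

-- ===== LEMMAS AND PROOFS =====

-- the lookup, characterised
theorem pvOrder_getD (t : String) :
    pvOrder.getD t 999 =
      if t = "taken_players" then 0
      else if t = "waivers" then 1
      else if t = "free_agents_p" then 2
      else if t = "free_agents_b" then 3
      else (999 : Int) := by
  have h : pvOrder = PySem.Dict.mk [("taken_players", 0), ("waivers", 1), ("free_agents_p", 2), ("free_agents_b", 3)] := by decide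
  rw [PySem.Dict.getD_eq_get?_getD, h]
  simp only [PySem.Dict.get?_mk_cons, beq_iff_eq]
  by_cases h1 : t = "taken_players"
  · subst h1; decide
  rw [if_neg (fun e => h1 e.symm), if_neg h1]
  by_cases h2 : t = "waivers"
  · subst h2; decide
  rw [if_neg (fun e => h2 e.symm), if_neg h2]
  by_cases h3 : t = "free_agents_p"
  · subst h3; decide
  rw [if_neg (fun e => h3 e.symm), if_neg h3]
  by_cases h4 : t = "free_agents_b"
  · subst h4; decide
  rw [if_neg (fun e => h4 e.symm), if_neg h4]
  simp [PySem.Dict.get?]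

theorem pvOrder_getD_le (t : String) : pvOrder.getD t 999 ≤ 999 := by
  rw [pvOrder_getD]; split_ifs <;> omega

theorem alt_le (tags : List String) : source_priority_py_alt tags ≤ 999 := by
  unfold source_priority_py_alt; split_ifs <;> omega

-- B satisfies the min recurrence of A's scan
theorem alt_cons (t : String) (ts : List String) :
    source_priority_py_alt (t :: ts) = min (pvOrder.getD t 999) (source_priority_py_alt ts) := by
  simp only [source_priority_py_alt, List.contains_cons, pvOrder_getD, Bool.or_eq_true, beq_iff_eq]
  have h := alt_le ts
  simp only [source_priority_py_alt] at h
  split_ifs with h1 h2 h3 h4 <;> simp_all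

theorem foldl_min_eq_alt (ts : List String) (x : Int) (hx : x ≤ 999) :
    (ts.map (fun tag => pvOrder.getD tag 999)).foldl min x = min x (source_priority_py_alt ts) := by
  induction ts generalizing x with
  | nil => simp [source_priority_py_alt]; omega
  | cons t ts ih =>
    simp only [List.map_cons, List.foldl_cons]
    rw [ih (min x (pvOrder.getD t 999)) (by have := pvOrder_getD_le t; omega), alt_cons]
    omega

-- ===== VERDICT (by name: the statement is the Claim_ definition above) =====
theorem source_priority_py_spec : Claim_equal_source_priority_py := by
  intro tags _
  unfold Spec_source_priority_py source_priority_py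
  cases tags with
  | nil => decide
  | cons t ts =>
    simp only [List.map_cons, PySem.List.min?_id_cons]
    rw [foldl_min_eq_alt ts (pvOrder.getD t 999) (pvOrder_getD_le t), alt_cons]
    simp
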